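-- pv_equiv track=rewrite | github.com/goyalanirudh00/vajra-prototype | app.py | mock_llm_recommendations
-- ===== SOURCE A (Python) =====
-- from typing import List, Dict, Optional
--
-- def mock_llm_recommendations(sku: Dict, anomaly: Dict) -> List[str]:
--     """Fallback function when LLM is unavailable - generates exactly 3 context-aware recommendations"""
--     recommendations = []
--     anomaly_type = anomaly.get("type", "").lower()
--     is_perishable = sku.get("perishable", False)
--     is_frozen = sku.get("frozen", False)
--
--     # Context-aware recommendations - always return exactly 3
--     if "heat" in anomaly_type:
--         if is_perishable:
--             recommendations.append("Pre-cool delivery vans to maintain cold chain integrity")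
--             recommendations.append("Reduce exposure time for temperature-sensitive SKUs")
--             recommendations.append("Increase cold chain capacity by 15% during peak heat hours")
--         else:
--             recommendations.append("Monitor warehouse temperature controls")
--             recommendations.append("Prioritize early morning deliveries")
--             recommendations.append("Increase buffer stock for high-velocity items")
--
--     elif "snow" in anomaly_type or "storm" in anomaly_type or "rain" in anomaly_type:
--         if is_frozen:
--             recommendations.append("Pre-position inventory in high-demand ZIPs before storm")
--             recommendations.append("Increase buffer stock by 20% for frozen essentials")
--             recommendations.append("Throttle low-priority routes; prioritize high-velocity SKUs")
--         else:
--             recommendations.append("Increase buffer stock for essentials by 15%")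
--             recommendations.append("Pre-position couriers in strategic locations")
--             recommendations.append("Activate surge pricing for high-demand areas")
--
--     elif "flood" in anomaly_type:
--         recommendations.append("Reroute deliveries away from flood-prone areas")
--         recommendations.append("Increase buffer stock by 10% for all SKUs")
--         recommendations.append("Prioritize high-velocity perishables; delay non-essentials")
--
--     elif "hurricane" in anomaly_type:
--         recommendations.append("Pre-position emergency inventory 48 hours before landfall")
--         recommendations.append("Increase buffer stock for essentials by 25%")
--         recommendations.append("Throttle low-priority SKUs; prioritize high-velocity items")
--
--     else:  # Supply chain delay
--         recommendations.append("Increase buffer stock by 10% for affected SKUs")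
--         recommendations.append("Identify alternative suppliers for critical items")
--         recommendations.append("Prioritize high-velocity SKUs; delay low-priority restocking")
--
--     # Ensure we have exactly 3 recommendations
--     while len(recommendations) < 3:
--         recommendations.append("Monitor demand patterns and adjust inventory levels accordingly")
--
--     return recommendations[:3]
-- ===== SOURCE B (Python) =====
-- # Classify by minimum matched keyword priority, then index a flat triple list
-- # by 2*category + flag_bit: no if/elif cascade, no first-match scan.
-- _PRIORITY = {"heat": 0, "snow": 1, "storm": 1, "rain": 1, "flood": 2, "hurricane": 3}
--
-- _TRIPLES = [
--     # cat 0 (heat), bit 0 / bit 1 (perishable)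
--     ["Monitor warehouse temperature controls",
--      "Prioritize early morning deliveries",
--      "Increase buffer stock for high-velocity items"],
--     ["Pre-cool delivery vans to maintain cold chain integrity",
--      "Reduce exposure time for temperature-sensitive SKUs",
--      "Increase cold chain capacity by 15% during peak heat hours"],
--     # cat 1 (snow/storm/rain), bit 0 / bit 1 (frozen)
--     ["Increase buffer stock for essentials by 15%",
--      "Pre-position couriers in strategic locations",
--      "Activate surge pricing for high-demand areas"],
--     ["Pre-position inventory in high-demand ZIPs before storm",
--      "Increase buffer stock by 20% for frozen essentials",
--      "Throttle low-priority routes; prioritize high-velocity SKUs"],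
--     # cat 2 (flood), bit always 0
--     ["Reroute deliveries away from flood-prone areas",
--      "Increase buffer stock by 10% for all SKUs",
--      "Prioritize high-velocity perishables; delay non-essentials"],
--     [],
--     # cat 3 (hurricane), bit always 0
--     ["Pre-position emergency inventory 48 hours before landfall",
--      "Increase buffer stock for essentials by 25%",
--      "Throttle low-priority SKUs; prioritize high-velocity items"],
--     [],
--     # cat 4 (default / supply-chain delay), bit always 0
--     ["Increase buffer stock by 10% for affected SKUs",
--      "Identify alternative suppliers for critical items",
--      "Prioritize high-velocity SKUs; delay low-priority restocking"],
-- ]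
--
--
-- def mock_llm_recommendations(sku, anomaly):
--     """Fallback function when LLM is unavailable - generates exactly 3 context-aware recommendations"""
--     t = anomaly.get("type", "").lower()
--     cat = min((p for k, p in _PRIORITY.items() if k in t), default=4)
--     bit = 1 if (cat == 0 and sku.get("perishable", False)) or \
--                (cat == 1 and sku.get("frozen", False)) else 0
--     return list(_TRIPLES[2 * cat + bit])
-- ===== Notes on version B (the rewrite author's own statement) =====
-- stated objective: alternative
-- what changed: Replaces the first-match if/elif cascade (with its dead padding loop and [:3] slice) by a scan of ALL keywords taking the minimum matched category priority, then arithmetic indexing (2*category + flag bit) into a flat list of triples.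
import Mathlib
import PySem

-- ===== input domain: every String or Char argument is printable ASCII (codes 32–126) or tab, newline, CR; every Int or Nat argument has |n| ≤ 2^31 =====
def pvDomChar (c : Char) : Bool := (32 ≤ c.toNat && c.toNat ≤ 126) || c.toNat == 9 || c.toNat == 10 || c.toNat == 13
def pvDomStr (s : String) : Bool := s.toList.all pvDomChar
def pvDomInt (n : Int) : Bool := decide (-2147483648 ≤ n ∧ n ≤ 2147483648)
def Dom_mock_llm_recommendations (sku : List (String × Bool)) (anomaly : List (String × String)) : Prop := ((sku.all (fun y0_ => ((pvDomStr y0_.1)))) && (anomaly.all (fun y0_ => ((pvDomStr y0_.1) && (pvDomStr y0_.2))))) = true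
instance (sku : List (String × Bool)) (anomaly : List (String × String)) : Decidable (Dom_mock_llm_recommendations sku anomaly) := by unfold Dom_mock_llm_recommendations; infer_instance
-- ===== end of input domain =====

-- B replaces A's if/elif cascade by a minimum-matched-keyword-priority classification
-- plus arithmetic indexing (2*category + flag bit) into a flat triple list; objective: simpler.

-- ===== PORT A =====
-- the 'while len(recommendations) < 3' padding loop of A, transliterated with
-- structural fuel 3 (each iteration appends one element, so 3 iterations always suffice)
def pvPadGo : Nat → List String → List String
  | 0, recs => recs
  | n + 1, recs =>
    if recs.length < 3 then
      pvPadGo n (recs ++ ["Monitor demand patterns and adjust inventory levels accordingly"])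
    else recs

def pvPadLoop (recs : List String) : List String := pvPadGo 3 recs

def mock_llm_recommendations (sku : List (String × Bool)) (anomaly : List (String × String)) : List String :=
  let anomaly_type := PySem.Str.lower ((PySem.Dict.mk anomaly).getD "type" "")
  let is_perishable := (PySem.Dict.mk sku).getD "perishable" false
  let is_frozen := (PySem.Dict.mk sku).getD "frozen" false
  let recommendations : List String :=
    if PySem.Str.isIn "heat" anomaly_type then
      if is_perishable then
        ["Pre-cool delivery vans to maintain cold chain integrity",
         "Reduce exposure time for temperature-sensitive SKUs",
         "Increase cold chain capacity by 15% during peak heat hours"]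
      else
        ["Monitor warehouse temperature controls",
         "Prioritize early morning deliveries",
         "Increase buffer stock for high-velocity items"]
    else if PySem.Str.isIn "snow" anomaly_type || PySem.Str.isIn "storm" anomaly_type || PySem.Str.isIn "rain" anomaly_type then
      if is_frozen then
        ["Pre-position inventory in high-demand ZIPs before storm",
         "Increase buffer stock by 20% for frozen essentials",
         "Throttle low-priority routes; prioritize high-velocity SKUs"]
      else
        ["Increase buffer stock for essentials by 15%",
         "Pre-position couriers in strategic locations",
         "Activate surge pricing for high-demand areas"]
    else if PySem.Str.isIn "flood" anomaly_type then
      ["Reroute deliveries away from flood-prone areas",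
       "Increase buffer stock by 10% for all SKUs",
       "Prioritize high-velocity perishables; delay non-essentials"]
    else if PySem.Str.isIn "hurricane" anomaly_type then
      ["Pre-position emergency inventory 48 hours before landfall",
       "Increase buffer stock for essentials by 25%",
       "Throttle low-priority SKUs; prioritize high-velocity items"]
    else
      ["Increase buffer stock by 10% for affected SKUs",
       "Identify alternative suppliers for critical items",
       "Prioritize high-velocity SKUs; delay low-priority restocking"]
  PySem.List.slice (pvPadLoop recommendations) none (some 3)

-- ===== PORT B =====
-- the _PRIORITY dict of Source B (keyword -> category priority)
def pvPriority : List (String × Int) :=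
  [("heat", 0), ("snow", 1), ("storm", 1), ("rain", 1), ("flood", 2), ("hurricane", 3)]

-- the flat _TRIPLES list of Source B, indexed by 2*cat + bit
def pvTriples : List (List String) :=
  [["Monitor warehouse temperature controls",
    "Prioritize early morning deliveries",
    "Increase buffer stock for high-velocity items"],
   ["Pre-cool delivery vans to maintain cold chain integrity",
    "Reduce exposure time for temperature-sensitive SKUs",
    "Increase cold chain capacity by 15% during peak heat hours"],
   ["Increase buffer stock for essentials by 15%",
    "Pre-position couriers in strategic locations",
    "Activate surge pricing for high-demand areas"],
   ["Pre-position inventory in high-demand ZIPs before storm",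
    "Increase buffer stock by 20% for frozen essentials",
    "Throttle low-priority routes; prioritize high-velocity SKUs"],
   ["Reroute deliveries away from flood-prone areas",
    "Increase buffer stock by 10% for all SKUs",
    "Prioritize high-velocity perishables; delay non-essentials"],
   [],
   ["Pre-position emergency inventory 48 hours before landfall",
    "Increase buffer stock for essentials by 25%",
    "Throttle low-priority SKUs; prioritize high-velocity items"],
   [],
   ["Increase buffer stock by 10% for affected SKUs",
    "Identify alternative suppliers for critical items",
    "Prioritize high-velocity SKUs; delay low-priority restocking"]]

def mock_llm_recommendations_alt (sku : List (String × Bool)) (anomaly : List (String × String)) : List String :=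
  let t := PySem.Str.lower ((PySem.Dict.mk anomaly).getD "type" "")
  -- min((p for k,p in _PRIORITY.items() if k in t), default=4)
  let matched := pvPriority.filterMap (fun kp => if PySem.Str.isIn kp.1 t then some kp.2 else none)
  let cat : Int := (PySem.List.min? matched (fun x => x)).getD 4
  let bit : Int :=
    if (cat == 0 && (PySem.Dict.mk sku).getD "perishable" false)
       || (cat == 1 && (PySem.Dict.mk sku).getD "frozen" false) then 1 else 0
  -- _TRIPLES[2*cat+bit]; the index is always in range here, so the .getD [] default is never used
  (PySem.List.pyGet? pvTriples (2 * cat + bit)).getD []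

-- ===== PRECONDITION & SPEC =====
def Spec_mock_llm_recommendations (sku : List (String × Bool)) (anomaly : List (String × String)) (out : List String) : Prop := out = mock_llm_recommendations_alt sku anomaly
instance (sku : List (String × Bool)) (anomaly : List (String × String)) (out : List String) : Decidable (Spec_mock_llm_recommendations sku anomaly out) := by unfold Spec_mock_llm_recommendations; infer_instance

-- ===== CLAIM (what is proved, stated in full; the proofs are below) =====
def Claim_equal_mock_llm_recommendations : Prop := ∀ (sku : List (String × Bool)) (anomaly : List (String × String)), Dom_mock_llm_recommendations sku anomaly → Spec_mock_llm_recommendations sku anomaly (mock_llm_recommendations sku anomaly)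

-- ===== LEMMAS AND PROOFS =====
-- A's body with its five substring tests and two SKU flags abstracted as Bools
def pvA (b1 b2 b3 b4 b5 b6 p f : Bool) : List String :=
  let recommendations : List String :=
    if b1 then
      if p then
        ["Pre-cool delivery vans to maintain cold chain integrity",
         "Reduce exposure time for temperature-sensitive SKUs",
         "Increase cold chain capacity by 15% during peak heat hours"]
      else
        ["Monitor warehouse temperature controls",
         "Prioritize early morning deliveries",
         "Increase buffer stock for high-velocity items"]
    else if b2 || b3 || b4 then
      if f then
        ["Pre-position inventory in high-demand ZIPs before storm",
         "Increase buffer stock by 20% for frozen essentials",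
         "Throttle low-priority routes; prioritize high-velocity SKUs"]
      else
        ["Increase buffer stock for essentials by 15%",
         "Pre-position couriers in strategic locations",
         "Activate surge pricing for high-demand areas"]
    else if b5 then
      ["Reroute deliveries away from flood-prone areas",
       "Increase buffer stock by 10% for all SKUs",
       "Prioritize high-velocity perishables; delay non-essentials"]
    else if b6 then
      ["Pre-position emergency inventory 48 hours before landfall",
       "Increase buffer stock for essentials by 25%",
       "Throttle low-priority SKUs; prioritize high-velocity items"]
    else
      ["Increase buffer stock by 10% for affected SKUs",
       "Identify alternative suppliers for critical items",
       "Prioritize high-velocity SKUs; delay low-priority restocking"]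
  PySem.List.slice (pvPadLoop recommendations) none (some 3)

-- B's body with the same Bools abstracted (the keyword dispatch reduces to the right Bool
-- on each literal key of pvPriority)
def pvB (b1 b2 b3 b4 b5 b6 p f : Bool) : List String :=
  let matched := pvPriority.filterMap (fun kp =>
    if (if kp.1 = "heat" then b1 else if kp.1 = "snow" then b2 else if kp.1 = "storm" then b3
        else if kp.1 = "rain" then b4 else if kp.1 = "flood" then b5 else b6)
    then some kp.2 else none)
  let cat : Int := (PySem.List.min? matched (fun x => x)).getD 4
  let bit : Int := if (cat == 0 && p) || (cat == 1 && f) then 1 else 0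
  (PySem.List.pyGet? pvTriples (2 * cat + bit)).getD []

theorem pvA_eq (sku : List (String × Bool)) (anomaly : List (String × String)) :
    mock_llm_recommendations sku anomaly =
    pvA (PySem.Str.isIn "heat" (PySem.Str.lower ((PySem.Dict.mk anomaly).getD "type" "")))
        (PySem.Str.isIn "snow" (PySem.Str.lower ((PySem.Dict.mk anomaly).getD "type" "")))
        (PySem.Str.isIn "storm" (PySem.Str.lower ((PySem.Dict.mk anomaly).getD "type" "")))
        (PySem.Str.isIn "rain" (PySem.Str.lower ((PySem.Dict.mk anomaly).getD "type" "")))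
        (PySem.Str.isIn "flood" (PySem.Str.lower ((PySem.Dict.mk anomaly).getD "type" "")))
        (PySem.Str.isIn "hurricane" (PySem.Str.lower ((PySem.Dict.mk anomaly).getD "type" "")))
        ((PySem.Dict.mk sku).getD "perishable" false)
        ((PySem.Dict.mk sku).getD "frozen" false) := rfl

theorem pv_bridge : ∀ b1 b2 b3 b4 b5 b6 p f : Bool,
    pvA b1 b2 b3 b4 b5 b6 p f = pvB b1 b2 b3 b4 b5 b6 p f := by
  decide

-- ===== VERDICT (by name: the statement is the Claim_ definition above) =====
set_option maxHeartbeats 1000000 in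
theorem mock_llm_recommendations_spec : Claim_equal_mock_llm_recommendations := by
  intro sku anomaly _
  unfold Spec_mock_llm_recommendations
  rw [pvA_eq]
  simp only [mock_llm_recommendations_alt, pvPriority, List.filterMap_cons, List.filterMap_nil]
  generalize (PySem.Str.isIn "heat" (PySem.Str.lower ((PySem.Dict.mk anomaly).getD "type" ""))) = b1
  generalize (PySem.Str.isIn "snow" (PySem.Str.lower ((PySem.Dict.mk anomaly).getD "type" ""))) = b2
  generalize (PySem.Str.isIn "storm" (PySem.Str.lower ((PySem.Dict.mk anomaly).getD "type" ""))) = b3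
  generalize (PySem.Str.isIn "rain" (PySem.Str.lower ((PySem.Dict.mk anomaly).getD "type" ""))) = b4
  generalize (PySem.Str.isIn "flood" (PySem.Str.lower ((PySem.Dict.mk anomaly).getD "type" ""))) = b5
  generalize (PySem.Str.isIn "hurricane" (PySem.Str.lower ((PySem.Dict.mk anomaly).getD "type" ""))) = b6
  generalize ((PySem.Dict.mk sku).getD "perishable" false) = p
  generalize ((PySem.Dict.mk sku).getD "frozen" false) = f
  exact pv_bridge b1 b2 b3 b4 b5 b6 p f
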